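-- pv_equiv track=rewrite | github.com/Jaeyeop-Jung/CodingTest | 백준/1802.py | check
-- ===== SOURCE A (Python) =====
-- def check(s):
--     if s == '':
--         return False
--     mid = len(s) // 2
--     for i in range(mid):
--         if s[i] == s[len(s) - 1 - i]:
--             return True
--     return check(s[:mid]) or check(s[mid + 1:])
-- ===== SOURCE B (Python) =====
-- def check(s):
--     stack = [s]
--     while stack:
--         seg = stack.pop()
--         if not seg:
--             continue
--         n = len(seg)
--         mid = n // 2
--         if any(seg[i] == seg[n - 1 - i] for i in range(mid)):
--             return True
--         stack.append(seg[:mid])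
--         stack.append(seg[mid + 1:])
--     return False
-- ===== Notes on version B (the rewrite author's own statement) =====
-- stated objective: alternative
-- what changed: Replaced the recursive divide-and-conquer with an iterative explicit-stack (worklist) loop over string segments, returning True on the first matching pair and False when the worklist empties.
import Mathlib
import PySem

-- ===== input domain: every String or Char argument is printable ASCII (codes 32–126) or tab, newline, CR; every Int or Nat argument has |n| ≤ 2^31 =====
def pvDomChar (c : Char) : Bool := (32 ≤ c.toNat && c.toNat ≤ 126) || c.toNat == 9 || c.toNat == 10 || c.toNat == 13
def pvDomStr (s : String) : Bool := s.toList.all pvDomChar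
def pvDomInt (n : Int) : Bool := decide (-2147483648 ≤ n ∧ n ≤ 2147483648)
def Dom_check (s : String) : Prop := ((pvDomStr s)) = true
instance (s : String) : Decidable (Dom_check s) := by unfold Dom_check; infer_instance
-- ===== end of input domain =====

-- B replaces A's recursive divide-and-conquer with an iterative explicit-stack worklist loop; same cost, different decomposition.

-- ===== PORT A =====
-- A's recursion, over the character list. s[:mid] / s[mid+1:] with 0 ≤ mid < len are
-- exactly take mid / drop (mid+1); s[i] and s[len-1-i] are in range for i < mid.
def checkGo (l : List Char) : Bool :=
  if l = [] then false
  else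
    if (List.range (l.length / 2)).any (fun i => l[i]! == l[l.length - 1 - i]!) then true
    else checkGo (l.take (l.length / 2)) || checkGo (l.drop (l.length / 2 + 1))
termination_by l.length
decreasing_by
  all_goals
    have hl : 0 < l.length := List.length_pos_of_ne_nil (by assumption)
    simp only [List.length_take, List.length_drop]
    omega

def check (s : String) : Bool := checkGo s.toList

-- ===== PORT B =====
-- B's worklist loop: pop a segment, skip it if empty, return true on a matching pair,
-- otherwise push the two halves; false when the stack empties.
def checkLoop (stack : List (List Char)) : Bool :=
  match stack with
  | [] => false
  | seg :: rest =>
    if seg = [] then checkLoop rest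
    else
      if (List.range (seg.length / 2)).any
          (fun i => seg[i]! == seg[seg.length - 1 - i]!) then true
      else checkLoop (seg.take (seg.length / 2) :: seg.drop (seg.length / 2 + 1) :: rest)
termination_by (stack.map (fun l => 2 * l.length + 1)).sum
decreasing_by
  · simp
  · have hl : 0 < seg.length := List.length_pos_of_ne_nil (by assumption)
    simp only [List.map_cons, List.sum_cons, List.length_take, List.length_drop]
    omega

def check_alt (s : String) : Bool := checkLoop [s.toList]

-- ===== PRECONDITION & SPEC =====
def Spec_check (s : String) (out : Bool) : Prop := out = check_alt s
instance (s : String) (out : Bool) : Decidable (Spec_check s out) := by unfold Spec_check; infer_instance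

-- ===== CLAIM (what is proved, stated in full; the proofs are below) =====
def Claim_equal_check : Prop := ∀ (s : String), Dom_check s → Spec_check s (check s)

-- ===== LEMMAS AND PROOFS =====

-- The worklist loop decides whether ANY segment on the stack satisfies A's recursion.
theorem checkLoop_eq_any (stack : List (List Char)) :
    checkLoop stack = stack.any checkGo := by
  have h0 : checkGo ([] : List Char) = false := by rw [checkGo]; simp
  fun_induction checkLoop stack with
  | case1 => simp
  | case2 rest ih => simp [List.any_cons, h0, ih]
  | case3 seg rest h1 h2 =>
    have ht : checkGo seg = true := by rw [checkGo, if_neg h1, if_pos h2]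
    simp [List.any_cons, ht]
  | case4 seg rest h1 h2 ih =>
    have hs : checkGo seg
        = (checkGo (seg.take (seg.length / 2)) || checkGo (seg.drop (seg.length / 2 + 1))) := by
      rw [checkGo, if_neg h1, if_neg h2]
    simp [ih, List.any_cons, hs, Bool.or_assoc]


-- ===== VERDICT (by name: the statement is the Claim_ definition above) =====
theorem check_spec : Claim_equal_check := by
  intro s _
  unfold Spec_check check check_alt
  rw [checkLoop_eq_any]
  simp
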